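-- pv_equiv track=rewrite | github.com/wanwan0421/HuangheDemoBackend | intelligent-server/agents/data_scan/tools.py | identify_primary_candidates
-- ===== SOURCE A (Python) =====
-- from typing import Annotated, Dict, Any, List, Optional, TypedDict, Set
--
-- def identify_primary_candidates(files: List[str]) -> List[str]:
--     """返回按优先级排序的候选主文件列表"""
--     if not files:
--         return []
--
--     priority_extensions = [
--         '.xml',
--         '.tif', '.tiff', '.geotiff',
--         '.shp',
--         '.nc', '.netcdf',
--         '.geojson',
--         '.csv',
--         '.json',
--         '.h5', '.hdf', '.hdf5'
--     ]
--
--     ranked: List[str] = []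
--     for ext in priority_extensions:
--         ranked.extend([f for f in files if f.lower().endswith(ext)])
--
--     extras = [f for f in files if f not in ranked]
--     return ranked + extras
-- ===== SOURCE B (Python) =====
-- def identify_primary_candidates(files):
--     """返回按优先级排序的候选主文件列表"""
--     priority_extensions = [
--         '.xml',
--         '.tif', '.tiff', '.geotiff',
--         '.shp',
--         '.nc', '.netcdf',
--         '.geojson',
--         '.csv',
--         '.json',
--         '.h5', '.hdf', '.hdf5'
--     ]
--     n = len(priority_extensions)
--     # one pass: drop each file into the bucket of the first extension it matches
--     buckets = [[] for _ in range(n + 1)]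
--     for f in files:
--         fl = f.lower()
--         k = n
--         for i, ext in enumerate(priority_extensions):
--             if fl.endswith(ext):
--                 k = i
--                 break
--         buckets[k].append(f)
--     out = []
--     for b in buckets:
--         out.extend(b)
--     return out
-- ===== Notes on version B (the rewrite author's own statement) =====
-- stated objective: alternative
-- what changed: A filters the whole file list once per priority extension and then rescans it with a membership test for the extras; B makes a single pass over the files, dropping each file into the bucket of the first extension it matches (last bucket = no match) and concatenates the buckets.
import Mathlib
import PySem

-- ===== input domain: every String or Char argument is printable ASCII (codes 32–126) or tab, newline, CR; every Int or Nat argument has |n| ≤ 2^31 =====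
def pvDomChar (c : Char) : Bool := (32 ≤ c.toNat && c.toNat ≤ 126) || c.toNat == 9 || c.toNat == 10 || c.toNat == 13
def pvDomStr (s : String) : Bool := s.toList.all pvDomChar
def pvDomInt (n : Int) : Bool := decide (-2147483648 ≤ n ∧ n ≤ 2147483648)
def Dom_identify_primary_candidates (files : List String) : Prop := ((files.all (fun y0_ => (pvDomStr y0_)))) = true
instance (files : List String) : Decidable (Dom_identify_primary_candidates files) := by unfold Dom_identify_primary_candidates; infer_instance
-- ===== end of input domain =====

-- B replaces A's one-filter-pass-per-extension (plus a membership scan for the extras)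
-- by a single pass that drops each file into the bucket of the first extension it matches.

-- ===== PORT A =====
def pvExtsA : List String :=
  [".xml", ".tif", ".tiff", ".geotiff", ".shp", ".nc", ".netcdf",
   ".geojson", ".csv", ".json", ".h5", ".hdf", ".hdf5"]

def identify_primary_candidates (files : List String) : List String :=
  if files = [] then []
  else
    let ranked := pvExtsA.foldl
      (fun acc ext => acc ++ files.filter (fun f => PySem.Str.endswith (PySem.Str.lower f) ext)) []
    let extras := files.filter (fun f => !ranked.contains f)
    ranked ++ extras

-- ===== PORT B =====
def pvExtsB : List String :=
  [".xml", ".tif", ".tiff", ".geotiff", ".shp", ".nc", ".netcdf",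
   ".geojson", ".csv", ".json", ".h5", ".hdf", ".hdf5"]

-- the inner 'for i, ext … if fl.endswith(ext): k = i; break' loop (k defaults to len)
def pvFirstIdx : List String → String → Nat
  | [], _ => 0
  | e :: rest, fl => if PySem.Str.endswith fl e then 0 else pvFirstIdx rest fl + 1

-- 'buckets[k].append(f)'
def pvBucketStep (bs : List (List String)) (f : String) : List (List String) :=
  let k := pvFirstIdx pvExtsB (PySem.Str.lower f)
  bs.set k (bs.getD k [] ++ [f])

def identify_primary_candidates_alt (files : List String) : List String :=
  let buckets := files.foldl pvBucketStep (List.replicate (pvExtsB.length + 1) [])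
  buckets.foldl (fun out b => out ++ b) []

-- ===== PRECONDITION & SPEC =====
def Spec_identify_primary_candidates (files : List String) (out : List String) : Prop := out = identify_primary_candidates_alt files
instance (files : List String) (out : List String) : Decidable (Spec_identify_primary_candidates files out) := by unfold Spec_identify_primary_candidates; infer_instance

-- ===== CLAIM (what is proved, stated in full; the proofs are below) =====
def Claim_equal_identify_primary_candidates : Prop := ∀ (files : List String), Dom_identify_primary_candidates files → Spec_identify_primary_candidates files (identify_primary_candidates files)

-- ===== LEMMAS AND PROOFS =====

def pvKey (f : String) : Nat := pvFirstIdx pvExtsB (PySem.Str.lower f)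

-- no priority extension is a suffix of another
def pvNonSuf (a b : String) : Prop := ¬(a.toList <:+ b.toList) ∧ ¬(b.toList <:+ a.toList)

lemma pvPW : List.Pairwise pvNonSuf pvExtsB := by unfold pvNonSuf; decide

lemma pvSuffixTotal (l1 l2 l3 : List Char) (h1 : l1 <:+ l3) (h2 : l2 <:+ l3) :
    l1 <:+ l2 ∨ l2 <:+ l1 := by
  rcases List.prefix_or_prefix_of_prefix (List.reverse_prefix.mpr h1) (List.reverse_prefix.mpr h2)
    with h | h
  · exact Or.inl (List.reverse_prefix.mp h)
  · exact Or.inr (List.reverse_prefix.mp h)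

lemma pvExcl (g a b : String) (h : pvNonSuf a b)
    (ha : PySem.Str.endswith g a = true) : PySem.Str.endswith g b = false := by
  by_contra hb
  have hb' : PySem.Str.endswith g b = true := by
    cases hgb : PySem.Str.endswith g b <;> simp_all
  have sa : a.toList <:+ g.toList := by
    have := PySem.Chars.endswith_iff g.toList a.toList
    simp only [PySem.Str.endswith] at ha
    exact this.mp ha
  have sb : b.toList <:+ g.toList := by
    have := PySem.Chars.endswith_iff g.toList b.toList
    simp only [PySem.Str.endswith] at hb'
    exact this.mp hb'
  rcases pvSuffixTotal _ _ _ sa sb with hs | hs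
  · exact h.1 hs
  · exact h.2 hs

lemma pvFirstIdx_le (l : List String) (g : String) : pvFirstIdx l g ≤ l.length := by
  induction l with
  | nil => simp [pvFirstIdx]
  | cons e rest ih =>
    simp only [pvFirstIdx]
    split
    · simp
    · simp; omega

lemma pvEndsC (g e : String) :
    PySem.Str.endswith (PySem.Str.lower g) e =
    PySem.Chars.endswith (PySem.Chars.lower g.toList) e.toList := by
  simp [PySem.Str.endswith]

lemma pvFlatMapCongr {α β : Type} (l : List α) (f g : α → List β)
    (h : ∀ a ∈ l, f a = g a) : l.flatMap f = l.flatMap g := by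
  induction l with
  | nil => rfl
  | cons a rest ih =>
    simp only [List.flatMap_cons]
    rw [h a (by simp), ih (fun a ha => h a (by simp [ha]))]

-- A's ranked list: each extension's filter, restricted step by step to the not-yet-matched files,
-- equals the bucket-indexed form.
lemma pvMain : ∀ (l : List String), List.Pairwise pvNonSuf l → ∀ (files : List String),
    l.flatMap (fun e => files.filter (fun f => PySem.Str.endswith (PySem.Str.lower f) e)) =
    (List.range l.length).flatMap
      (fun i => files.filter (fun f => pvFirstIdx l (PySem.Str.lower f) == i)) := by
  intro l
  induction l with
  | nil => intro _ files; simp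
  | cons e rest ih =>
    intro hpw files
    have he : ∀ b ∈ rest, pvNonSuf e b := (List.pairwise_cons.mp hpw).1
    have hrest : List.Pairwise pvNonSuf rest := (List.pairwise_cons.mp hpw).2
    have hlen : (e :: rest).length = rest.length + 1 := rfl
    rw [hlen, List.range_succ_eq_map, List.flatMap_cons, List.flatMap_cons]
    -- first bucket
    have h0 : files.filter (fun f => pvFirstIdx (e :: rest) (PySem.Str.lower f) == 0) =
        files.filter (fun f => PySem.Str.endswith (PySem.Str.lower f) e) := by
      apply List.filter_congr
      intro f _
      by_cases h : PySem.Chars.endswith (PySem.Chars.lower f.toList) e.toList = true <;>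
        simp [pvFirstIdx, h]
    set files' := files.filter (fun f => !PySem.Str.endswith (PySem.Str.lower f) e) with hf'
    -- later buckets
    have h1 : ∀ i : Nat, files.filter (fun f => pvFirstIdx (e :: rest) (PySem.Str.lower f) == i + 1) =
        files'.filter (fun f => pvFirstIdx rest (PySem.Str.lower f) == i) := by
      intro i
      rw [hf', List.filter_filter]
      apply List.filter_congr
      intro f _
      by_cases h : PySem.Chars.endswith (PySem.Chars.lower f.toList) e.toList = true <;>
        simp [pvFirstIdx, h]
    -- the remaining extensions only match not-yet-matched files
    have h2 : rest.flatMap (fun e' => files.filter (fun f => PySem.Str.endswith (PySem.Str.lower f) e')) =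
        rest.flatMap (fun e' => files'.filter (fun f => PySem.Str.endswith (PySem.Str.lower f) e')) := by
      apply pvFlatMapCongr
      intro e' he'
      rw [hf', List.filter_filter]
      apply List.filter_congr
      intro f _
      by_cases h : PySem.Chars.endswith (PySem.Chars.lower f.toList) e'.toList = true
      · have hs : PySem.Str.endswith (PySem.Str.lower f) e' = true := by rw [pvEndsC]; exact h
        have hE := pvExcl (PySem.Str.lower f) e' e ⟨(he e' he').2, (he e' he').1⟩ hs
        have hE' : PySem.Chars.endswith (PySem.Chars.lower f.toList) e.toList = false := by
          rw [← pvEndsC]; exact hE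
        simp [h, hE']
      · simp_all
    rw [h0, h2, ih hrest files', List.flatMap_map]
    congr 1
    apply pvFlatMapCongr
    intro i _
    exact (h1 i).symm

-- bucket fold invariant
lemma pvLenFold : ∀ (files : List String) (bs : List (List String)),
    (files.foldl pvBucketStep bs).length = bs.length := by
  intro files
  induction files with
  | nil => intro bs; rfl
  | cons f rest ih => intro bs; rw [List.foldl_cons, ih]; simp [pvBucketStep]

lemma pvGetDSet (bs : List (List String)) (k : Nat) (v : List String) (i : Nat) (hk : k < bs.length) :
    (bs.set k v).getD i [] = if i = k then v else bs.getD i [] := by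
  simp only [List.getD_eq_getElem?_getD, List.getElem?_set]
  by_cases h : k = i
  · subst h; simp [hk]
  · have h' : ¬ i = k := fun hh => h hh.symm
    simp [h, h']

lemma pvGetDFold : ∀ (files : List String) (bs : List (List String)) (i : Nat),
    pvExtsB.length < bs.length →
    (files.foldl pvBucketStep bs).getD i [] = bs.getD i [] ++ files.filter (fun f => pvKey f == i) := by
  intro files
  induction files with
  | nil => intro bs i _; simp
  | cons f rest ih =>
    intro bs i hlen
    rw [List.foldl_cons, ih _ _ (by simp [pvBucketStep, hlen])]
    have hk : pvKey f < bs.length :=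
      Nat.lt_of_le_of_lt (pvFirstIdx_le pvExtsB (PySem.Str.lower f)) hlen
    show (pvBucketStep bs f).getD i [] ++ _ = _
    have hk' : pvFirstIdx pvExtsB (PySem.Str.lower f) < bs.length := hk
    simp only [pvBucketStep]
    rw [pvGetDSet bs _ _ i hk', List.filter_cons]
    have hkey : pvFirstIdx pvExtsB (PySem.Str.lower f) = pvKey f := rfl
    rw [hkey]
    by_cases h : pvKey f = i
    · simp [h, List.append_assoc]
    · have h1 : (pvKey f == i) = false := by simp [h]
      have h2 : ¬ i = pvKey f := fun hh => h hh.symm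
      simp [h1, h2]

lemma pvFoldlAppend : ∀ (l : List (List String)) (acc : List String),
    l.foldl (fun a b => a ++ b) acc = acc ++ l.flatten := by
  intro l
  induction l with
  | nil => intro acc; simp
  | cons b rest ih => intro acc; rw [List.foldl_cons, ih]; simp

lemma pvBucketsEq (files : List String) :
    files.foldl pvBucketStep (List.replicate (pvExtsB.length + 1) []) =
    (List.range (pvExtsB.length + 1)).map (fun i => files.filter (fun f => pvKey f == i)) := by
  apply List.ext_getElem
  · rw [pvLenFold]; simp
  · intro i h1 h2
    have hlen : pvExtsB.length < (List.replicate (pvExtsB.length + 1) ([] : List String)).length := by simp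
    have hi : i < pvExtsB.length + 1 := by simpa [pvLenFold] using h1
    rw [← List.getD_eq_getElem _ [] h1, ← List.getD_eq_getElem _ [] h2,
      pvGetDFold files _ i hlen]
    simp [List.getD_eq_getElem?_getD, List.getElem?_map, List.getElem?_range hi]

lemma pvAltEq (files : List String) :
    identify_primary_candidates_alt files =
    (List.range (pvExtsB.length + 1)).flatMap (fun i => files.filter (fun f => pvKey f == i)) := by
  show (files.foldl pvBucketStep _).foldl (fun a b => a ++ b) [] = _
  rw [pvBucketsEq, pvFoldlAppend]
  simp [List.flatMap_def]

lemma pvRankedEq (files : List String) :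
    pvExtsA.foldl
      (fun acc ext => acc ++ files.filter (fun f => PySem.Str.endswith (PySem.Str.lower f) ext)) [] =
    (List.range pvExtsB.length).flatMap (fun i => files.filter (fun f => pvKey f == i)) := by
  rw [PySem.List.foldl_append_eq_flatMap]
  have hab : pvExtsA = pvExtsB := rfl
  rw [List.nil_append, hab]
  exact pvMain pvExtsB pvPW files

lemma pvMemRanked (files : List String) (f : String) (hfmem : f ∈ files) :
    (f ∈ (List.range pvExtsB.length).flatMap (fun i => files.filter (fun g => pvKey g == i))) ↔
    pvKey f < pvExtsB.length := by
  constructor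
  · intro h
    rcases List.mem_flatMap.mp h with ⟨i, hi, hf⟩
    have := (List.mem_filter.mp hf).2
    have hk : pvKey f = i := by simpa using this
    rw [hk]
    simpa using hi
  · intro h
    apply List.mem_flatMap.mpr
    exact ⟨pvKey f, by simpa using h, List.mem_filter.mpr ⟨hfmem, by simp⟩⟩

-- ===== VERDICT (by name: the statement is the Claim_ definition above) =====
theorem identify_primary_candidates_spec : Claim_equal_identify_primary_candidates := by
  intro files _
  show identify_primary_candidates files = identify_primary_candidates_alt files
  by_cases hnil : files = []
  · subst hnil; decide
  · rw [identify_primary_candidates]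
    simp only [hnil, if_false]
    rw [pvAltEq, pvRankedEq]
    have hextras : files.filter
        (fun f => !((List.range pvExtsB.length).flatMap
          (fun i => files.filter (fun g => pvKey g == i))).contains f) =
        files.filter (fun f => pvKey f == pvExtsB.length) := by
      apply List.filter_congr
      intro f hf
      have hle := pvFirstIdx_le pvExtsB (PySem.Str.lower f)
      by_cases h : pvKey f < pvExtsB.length
      · have hm := (pvMemRanked files f hf).mpr h
        have : pvKey f ≠ pvExtsB.length := by omega
        simp [hm, this]
      · have heq : pvKey f = pvExtsB.length := by unfold pvKey at *; omega
        have hm : ¬ (f ∈ (List.range pvExtsB.length).flatMap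
            (fun i => files.filter (fun g => pvKey g == i))) := by
          intro hmm
          exact h ((pvMemRanked files f hf).mp hmm)
        simp [hm, heq]
    rw [hextras, List.range_succ, List.flatMap_append]
    simp
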